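-- pv_equiv track=rewrite | github.com/lukademetrashvil1/GOA-homeworks | level 070/classwork/cw.py | domain_name
-- ===== SOURCE A (Python) =====
-- def domain_name(url):
--
--     if url[:7] == "http://":
--         url = url[7:]
--     elif url[:8] == "https://":
--         url = url[8:]
--
--     if url[:4] == "www.":
--         url = url[4:]
--
--
--     domain = ''
--     for char in url:
--         if char == '.':
--             break
--         domain += char
--
--     return domain
-- ===== SOURCE B (Python) =====
-- def domain_name(url):
--     scheme, sep, rest = url.partition("://")
--     if sep and scheme in ("http", "https"):
--         url = rest
--     url = url.removeprefix("www.")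
--     return url.split(".", 1)[0]
-- ===== Notes on version B (the rewrite author's own statement) =====
-- stated objective: idiomatic
-- what changed: Replaces the prefix-slicing if/elif branches and the char-by-char accumulation loop with str.partition on the scheme separator, removeprefix of the www prefix, and a single one-split to take the leading label, so the per-character Python loop disappears into C-level string methods.
import Mathlib
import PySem

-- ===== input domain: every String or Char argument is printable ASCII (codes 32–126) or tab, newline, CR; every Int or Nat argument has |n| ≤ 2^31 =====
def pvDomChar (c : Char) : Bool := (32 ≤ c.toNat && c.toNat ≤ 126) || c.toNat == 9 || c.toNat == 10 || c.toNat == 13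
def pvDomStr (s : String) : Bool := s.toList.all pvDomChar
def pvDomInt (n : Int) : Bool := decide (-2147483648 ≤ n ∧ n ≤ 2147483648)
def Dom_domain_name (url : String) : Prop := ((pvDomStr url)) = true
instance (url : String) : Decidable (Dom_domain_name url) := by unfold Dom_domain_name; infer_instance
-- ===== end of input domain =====

-- B replaces A's prefix-slicing if/elif branches and char-by-char accumulation loop
-- with partition("://") + removeprefix("www.") + split(".",1)[0] (idiomatic; same cost).


-- ===== PORT A =====
-- the 'domain += char' loop with its 'break' on '.'
def pvLoopA : List Char → String → String
  | [], d => d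
  | c :: cs, d => if c = '.' then d else pvLoopA cs (d.push c)

-- url[:k] / url[k:] with nonnegative literal k are exactly take/drop on the char list
def domain_name (url : String) : String :=
  let l := url.toList
  let l1 :=
    if l.take 7 = "http://".toList then l.drop 7
    else if l.take 8 = "https://".toList then l.drop 8
    else l
  let l2 := if l1.take 4 = "www.".toList then l1.drop 4 else l1
  pvLoopA l2 ""

-- ===== PORT B =====
-- str.partition("://"): chars before the FIRST "://" and chars after it; none if absent
def pvPart : List Char → Option (List Char × List Char)
  | [] => none
  | c :: cs =>
    if (c :: cs).take 3 = [':', '/', '/'] then some ([], cs.drop 2)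
    else
      match pvPart cs with
      | some (b, r) => some (c :: b, r)
      | none => none

-- str.removeprefix(p)
def pvRemovePrefix (p l : List Char) : List Char :=
  if p.isPrefixOf l then l.drop p.length else l

def domain_name_alt (url : String) : String :=
  let l := url.toList
  let l1 :=
    match pvPart l with
    | some (scheme, rest) =>
      if scheme = "http".toList ∨ scheme = "https".toList then rest else l
    | none => l
  let l2 := pvRemovePrefix "www.".toList l1
  -- url.split(".", 1)[0] = the chars before the first '.'
  String.ofList (l2.takeWhile (· ≠ '.'))

-- ===== PRECONDITION & SPEC =====
def Spec_domain_name (url : String) (out : String) : Prop := out = domain_name_alt url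
instance (url : String) (out : String) : Decidable (Spec_domain_name url out) := by unfold Spec_domain_name; infer_instance

-- ===== CLAIM (what is proved, stated in full; the proofs are below) =====
def Claim_equal_domain_name : Prop := ∀ (url : String), Dom_domain_name url → Spec_domain_name url (domain_name url)

-- ===== LEMMAS AND PROOFS =====

-- pvPart splits its input at the found separator
theorem pvPart_eq_append {l b r : List Char} (h : pvPart l = some (b, r)) :
    l = b ++ ':' :: '/' :: '/' :: r := by
  induction l generalizing b r with
  | nil => simp [pvPart] at h
  | cons c cs ih =>
    rw [pvPart] at h
    by_cases ht : (c :: cs).take 3 = [':', '/', '/']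
    · rw [if_pos ht] at h
      obtain ⟨hb, hr⟩ : b = [] ∧ cs.drop 2 = r := by
        simpa [eq_comm] using h
      subst hb hr
      have hc : c = ':' ∧ cs.take 2 = ['/', '/'] := by
        simpa [List.take_succ_cons] using ht
      obtain ⟨hc1, hc2⟩ := hc
      subst hc1
      conv_lhs => rw [← List.take_append_drop 2 cs, hc2]
      simp
    · rw [if_neg ht] at h
      cases hp : pvPart cs with
      | none => rw [hp] at h; simp at h
      | some p =>
        obtain ⟨b', r'⟩ := p
        rw [hp] at h
        obtain ⟨hb, hr⟩ : c :: b' = b ∧ r' = r := by simpa using h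
        subst hb hr
        simpa using ih hp

-- the loop of A returns acc ++ (chars before the first '.')
theorem pvLoopA_eq (l : List Char) (acc : List Char) :
    pvLoopA l (String.ofList acc) = String.ofList (acc ++ l.takeWhile (· ≠ '.')) := by
  induction l generalizing acc with
  | nil => simp [pvLoopA]
  | cons c cs ih =>
    by_cases hc : c = '.'
    · simp [pvLoopA, hc]
    · have hpush : (String.ofList acc).push c = String.ofList (acc ++ [c]) := by
        apply String.toList_injective; simp
      simp only [pvLoopA, if_neg hc, hpush, ih (acc ++ [c])]
      simp [hc]

theorem tl_http7 : "http://".toList = ['h','t','t','p',':','/','/'] := by decide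
theorem tl_https8 : "https://".toList = ['h','t','t','p','s',':','/','/'] := by decide
theorem tl_http : "http".toList = ['h','t','t','p'] := by decide
theorem tl_https : "https".toList = ['h','t','t','p','s'] := by decide
theorem tl_www : "www.".toList = ['w','w','w','.'] := by decide

-- B's partition step strips exactly A's "http://" / "https://" prefixes
theorem strip_eq (l : List Char) :
    (match pvPart l with
     | some (scheme, rest) =>
       if scheme = "http".toList ∨ scheme = "https".toList then rest else l
     | none => l)
    = (if l.take 7 = "http://".toList then l.drop 7
       else if l.take 8 = "https://".toList then l.drop 8
       else l) := by
  by_cases h7 : l.take 7 = "http://".toList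
  · have hl : l = "http://".toList ++ l.drop 7 := by
      conv_lhs => rw [← List.take_append_drop 7 l, h7]
    rw [hl]
    generalize l.drop 7 = t
    simp [pvPart, tl_http7, tl_http, tl_https, List.take]
  · by_cases h8 : l.take 8 = "https://".toList
    · have hl : l = "https://".toList ++ l.drop 8 := by
        conv_lhs => rw [← List.take_append_drop 8 l, h8]
      rw [hl]
      have h7' : ("https://".toList ++ l.drop 8).take 7 ≠ "http://".toList := by
        rw [← hl]; exact h7
      generalize ht : l.drop 8 = t
      rw [ht] at h7'
      simp only [tl_http7, tl_https8, tl_http, tl_https] at h7' ⊢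
      simp [pvPart, List.take]
    · rw [if_neg h7, if_neg h8]
      cases hp : pvPart l with
      | none => rfl
      | some p =>
        obtain ⟨s, r⟩ := p
        have hl := pvPart_eq_append hp
        simp only []
        split
        · rename_i hs
          rcases hs with hs | hs
          · exfalso; apply h7
            rw [hl, hs]; simp [tl_http, tl_http7, List.take]
          · exfalso; apply h8
            rw [hl, hs]; simp [tl_https, tl_https8, List.take]
        · rfl

-- B's removeprefix("www.") is exactly A's slice test
theorem www_eq (l : List Char) :
    pvRemovePrefix "www.".toList l
    = (if l.take 4 = "www.".toList then l.drop 4 else l) := by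
  unfold pvRemovePrefix
  by_cases h : l.take 4 = "www.".toList
  · have hl : l = "www.".toList ++ l.drop 4 := by
      conv_lhs => rw [← List.take_append_drop 4 l, h]
    rw [if_pos h, hl]
    simp
  · rw [if_neg h]
    have hnp : ¬ (['w', 'w', 'w', '.'] <+: l) := by
      intro hpre
      apply h
      obtain ⟨t, ht⟩ := hpre
      rw [← ht]; simp [tl_www, List.take]
    simp [hnp]

-- ===== VERDICT (by name: the statement is the Claim_ definition above) =====
theorem domain_name_spec : Claim_equal_domain_name := by
  intro url _
  unfold Spec_domain_name domain_name domain_name_alt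
  simp only [strip_eq, www_eq]
  have h0 : ("" : String) = String.ofList [] := rfl
  rw [h0, pvLoopA_eq]
  simp
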